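-- pv_equiv track=rewrite | github.com/develoPHM/algorithm | programmers/Lv_1/비밀지도.py | solution
-- ===== SOURCE A (Python) =====
-- def solution(n, arr1, arr2):
--     arr3 = [0] * n
--     ans = []
--     for i in range(n):
--         arr3[i] = str(int(bin(arr1[i])[2:]) + int(bin(arr2[i])[2:]))
--     for i in range(n):
--         arr3[i] = '0' * (n - len(arr3[i])) + arr3[i]
--     for i in range(n):
--         a = ''
--         for j in range(n):
--             if arr3[i][j] == '0':
--                 a += ' '
--             else:
--                 a += '#'
--         ans.append(a)
--     return ans
-- ===== SOURCE B (Python) =====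
-- def solution(n, arr1, arr2):
--     return [''.join('#' if c == '1' else ' '
--                     for c in format(arr1[i] | arr2[i], 'b').zfill(n)[:n])
--             for i in range(n)]
-- ===== Notes on version B (the rewrite author's own statement) =====
-- stated objective: idiomatic
-- what changed: B computes each row in one pass from the real bitwise OR (arr1[i] | arr2[i]) formatted as a zero-padded binary string and translated char-wise, instead of A's three separate passes that add the decimal readings of the two binary strings, left-pad the sum's digit string, and then scan it character by character.
import Mathlib
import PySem

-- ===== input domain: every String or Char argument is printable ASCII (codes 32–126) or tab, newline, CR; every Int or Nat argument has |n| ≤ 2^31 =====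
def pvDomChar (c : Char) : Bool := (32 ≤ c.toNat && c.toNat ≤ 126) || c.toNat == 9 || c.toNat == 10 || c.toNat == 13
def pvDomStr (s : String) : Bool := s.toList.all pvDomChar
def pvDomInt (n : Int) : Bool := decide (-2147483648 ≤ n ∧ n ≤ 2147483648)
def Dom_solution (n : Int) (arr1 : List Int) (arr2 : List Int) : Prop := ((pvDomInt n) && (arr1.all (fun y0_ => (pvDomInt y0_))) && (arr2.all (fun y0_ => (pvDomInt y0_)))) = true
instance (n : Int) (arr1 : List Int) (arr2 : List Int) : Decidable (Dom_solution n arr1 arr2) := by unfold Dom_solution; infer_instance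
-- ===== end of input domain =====

-- B builds each row directly from the integer bitwise OR formatted in binary, in one
-- pass, instead of A's three passes over a decimal-addition-of-binary-strings trick.

-- ===== PORT A =====
-- Hand port of Python's int(s): a left fold accumulating decimal digits.  It is exact
-- for the nonempty all-digit strings that bin(x)[2:] produces when x ≥ 0; on any other
-- input (e.g. the 'b101' that a negative x yields) Python's int raises ValueError, and
-- such inputs are excluded by Pre_solution.
def pyIntOfDigits (s : String) : Int :=
  s.toList.foldl (fun acc c => acc * 10 + ((PySem.Int.digitVal? c).getD 0 : Int)) 0

def solution (n : Int) (arr1 : List Int) (arr2 : List Int) : List String :=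
  let rng := PySem.List.pyRange 0 n 1
  -- for i in range(n): arr3[i] = str(int(bin(arr1[i])[2:]) + int(bin(arr2[i])[2:]))
  -- (arr1[i]/arr2[i] are in range under Pre_solution, so the pyGetD default is never used)
  let arr3 := rng.map (fun i =>
    PySem.Int.toStr
      (pyIntOfDigits (PySem.Str.slice (PySem.Int.pyBin (PySem.List.pyGetD arr1 i 0)) (some 2) none)
       + pyIntOfDigits (PySem.Str.slice (PySem.Int.pyBin (PySem.List.pyGetD arr2 i 0)) (some 2) none)))
  -- for i in range(n): arr3[i] = '0' * (n - len(arr3[i])) + arr3[i]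
  let arr3 := arr3.map (fun s =>
    String.ofList (PySem.List.pyRepeat ['0'] (n - PySem.Str.len s)) ++ s)
  -- for i in range(n): a = ''; for j in range(n): a += ' ' or '#'; ans.append(a)
  -- (arr3[i][j] is in range: after padding len(arr3[i]) ≥ n, so pyGet? is always some)
  rng.foldl (fun ans i =>
    let s := PySem.List.pyGetD arr3 i ""
    let a := rng.foldl (fun a j =>
      a ++ (if PySem.Str.pyGet? s j = some '0' then " " else "#")) ""
    ans ++ [a]) []

-- ===== PORT B =====
def solution_alt (n : Int) (arr1 : List Int) (arr2 : List Int) : List String :=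
  (PySem.List.pyRange 0 n 1).map (fun i =>
    -- ''.join('#' if c == '1' else ' ' for c in format(arr1[i] | arr2[i], 'b').zfill(n)[:n])
    String.ofList
      ((PySem.Str.slice
          (PySem.Str.zfill
            (PySem.Int.toBin
              (PySem.Int.bor (PySem.List.pyGetD arr1 i 0) (PySem.List.pyGetD arr2 i 0))) n)
          none (some n)).toList.map
        (fun c => if c = '1' then '#' else ' ')))

-- ===== PRECONDITION & SPEC =====
-- Pre_ excludes exactly the inputs where A raises: n > len(arr1) or n > len(arr2)
-- (IndexError), or a negative entry among the first n of either array (bin gives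
-- '-0b…', so int(bin(x)[2:]) raises ValueError).
def Pre_solution (n : Int) (arr1 : List Int) (arr2 : List Int) : Prop :=
  n ≤ arr1.length ∧ n ≤ arr2.length ∧
  (∀ x ∈ arr1.take n.toNat, 0 ≤ x) ∧ (∀ x ∈ arr2.take n.toNat, 0 ≤ x)
instance (n : Int) (arr1 : List Int) (arr2 : List Int) : Decidable (Pre_solution n arr1 arr2) := by
  unfold Pre_solution; infer_instance

def pvWitness_solution : Int × List Int × List Int := (2, [5, 1], [3, 2])

def Spec_solution (n : Int) (arr1 : List Int) (arr2 : List Int) (out : List String) : Prop :=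
  out = solution_alt n arr1 arr2
instance (n : Int) (arr1 : List Int) (arr2 : List Int) (out : List String) :
    Decidable (Spec_solution n arr1 arr2 out) := by unfold Spec_solution; infer_instance

-- ===== CLAIM (what is proved, stated in full; the proofs are below) =====
def Claim_equal_solution : Prop := ∀ (n : Int) (arr1 : List Int) (arr2 : List Int),
  Dom_solution n arr1 arr2 → Pre_solution n arr1 arr2 →
  Spec_solution n arr1 arr2 (solution n arr1 arr2)


-- ===== LEMMAS AND PROOFS =====

-- the char translation A's inner loop performs, and the one B performs
def pvFA (c : Char) : Char := if c = '0' then ' ' else '#'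
def pvFB (c : Char) : Char := if c = '1' then '#' else ' '

-- the number whose decimal digits are the binary digits of m (= int(bin(m)[2:]))
def pvDec : Nat → Nat
  | 0 => 0
  | m + 1 => 10 * pvDec ((m + 1) / 2) + (m + 1) % 2
decreasing_by exact Nat.div_lt_self (Nat.succ_pos m) one_lt_two

theorem pvDec_eq (m : Nat) : pvDec m = 10 * pvDec (m / 2) + m % 2 := by
  cases m with
  | zero => simp [pvDec]
  | succ m => simp [pvDec]

theorem pvDec_zero : pvDec 0 = 0 := by simp [pvDec]

theorem pvDec_one : pvDec 1 = 1 := by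
  rw [pvDec_eq]; norm_num [pvDec_zero]

theorem pvDec_pos (m : Nat) (hm : 0 < m) : 0 < pvDec m := by
  induction m using Nat.strong_induction_on with
  | _ m ih =>
    rw [pvDec_eq]
    by_cases h2 : m % 2 = 1
    · omega
    · have := ih (m / 2) (by omega) (by omega)
      omega

theorem pvToDigits_two (m : Nat) : Nat.toDigits 2 m = Nat.toDigits 10 (pvDec m) := by
  induction m using Nat.strong_induction_on with
  | _ m ih =>
    rcases Nat.lt_or_ge m 2 with h | h
    · interval_cases m
      · rw [pvDec_zero]; decide
      · rw [pvDec_one]; decide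
    · have h2 : pvDec (m / 2) ≥ 1 := pvDec_pos _ (by omega)
      have hx : pvDec m = 10 * pvDec (m / 2) + m % 2 := pvDec_eq m
      rw [Nat.toDigits_of_base_le (by norm_num) h,
          Nat.toDigits_of_base_le (b := 10) (by norm_num) (by omega),
          ih (m / 2) (by omega)]
      have e1 : pvDec m / 10 = pvDec (m / 2) := by omega
      have e2 : pvDec m % 10 = m % 2 := by omega
      rw [e1, e2]

theorem pvDigitVal_digitChar (d : Nat) (hd : d < 10) :
    ((PySem.Int.digitVal? (Nat.digitChar d)).getD 0 : Int) = (d : Int) := by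
  interval_cases d <;> decide

-- the fold in pyIntOfDigits reads toDigits 10 k back as k
theorem pvParse_toDigits (k : Nat) (a0 : Int) :
    List.foldl (fun acc c => acc * 10 + ((PySem.Int.digitVal? c).getD 0 : Int)) a0
        (Nat.toDigits 10 k)
      = a0 * 10 ^ (Nat.toDigits 10 k).length + k := by
  induction k using Nat.strong_induction_on generalizing a0 with
  | _ k ih =>
    rcases Nat.lt_or_ge k 10 with h | h
    · rw [Nat.toDigits_of_lt_base h]
      simp [pvDigitVal_digitChar k h]
    · rw [Nat.toDigits_of_base_le (by norm_num) h, List.foldl_append,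
          ih (k / 10) (by omega) a0]
      simp only [List.foldl_cons, List.foldl_nil, List.length_append, List.length_cons,
        List.length_nil, pvDigitVal_digitChar (k % 10) (by omega)]
      have hk : (k : Int) = (k / 10 : Nat) * 10 + (k % 10 : Nat) := by
        push_cast; omega
      rw [pow_succ]
      push_cast
      ring_nf
      omega

theorem pvOr_div_two (a b : Nat) : (a ||| b) / 2 = a / 2 ||| b / 2 := by
  simpa [Nat.shiftRight_succ, Nat.shiftRight_eq_div_pow] using
    (@Nat.shiftRight_or_distrib 1 a b)

theorem pvOr_mod_two (a b : Nat) : (a ||| b) % 2 = a % 2 ||| b % 2 := by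
  rw [← Nat.and_one_is_mod, ← Nat.and_one_is_mod, ← Nat.and_one_is_mod,
    Nat.and_or_distrib_right]

theorem pvLe_or_left (a b : Nat) : a ≤ a ||| b := by
  apply Nat.le_of_testBit
  intro i h
  simp [Nat.testBit_or, h]

-- the decimal-addition digits of A, mapped to ' '/'#', are the OR bits mapped to ' '/'#'
theorem pvMap_row (a b : Nat) :
    (Nat.toDigits 10 (pvDec a + pvDec b)).map pvFA
      = (Nat.toDigits 2 (a ||| b)).map pvFB := by
  suffices H : ∀ s a b : Nat, a + b ≤ s →
      (Nat.toDigits 10 (pvDec a + pvDec b)).map pvFA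
        = (Nat.toDigits 2 (a ||| b)).map pvFB from H (a + b) a b le_rfl
  intro s
  induction s with
  | zero =>
    intro a b h
    have : a = 0 ∧ b = 0 := by omega
    rcases this with ⟨rfl, rfl⟩
    rw [pvDec_zero]; decide
  | succ s ih =>
    intro a b hab
    rcases Nat.lt_or_ge (max a b) 2 with h | h
    · have ha : a < 2 := by omega
      have hb : b < 2 := by omega
      interval_cases a <;> interval_cases b <;>
        simp [pvDec_zero, pvDec_one] <;> decide
    · -- one of a, b is ≥ 2
      have h2 : 2 ≤ a ∨ 2 ≤ b := by omega
      have hDpos : 1 ≤ pvDec (a / 2) + pvDec (b / 2) := by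
        rcases h2 with h2 | h2
        · have := pvDec_pos (a / 2) (by omega); omega
        · have := pvDec_pos (b / 2) (by omega); omega
      have hxa : pvDec a = 10 * pvDec (a / 2) + a % 2 := pvDec_eq a
      have hxb : pvDec b = 10 * pvDec (b / 2) + b % 2 := pvDec_eq b
      have hor2 : 2 ≤ a ||| b := by
        rcases h2 with h2 | h2
        · exact le_trans h2 (pvLe_or_left a b)
        · exact le_trans h2 (Nat.or_comm a b ▸ pvLe_or_left b a)
      rw [Nat.toDigits_of_base_le (b := 10) (by norm_num) (by omega),
          Nat.toDigits_of_base_le (b := 2) (by norm_num) hor2,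
          List.map_append, List.map_append]
      have e1 : (pvDec a + pvDec b) / 10 = pvDec (a / 2) + pvDec (b / 2) := by omega
      have e2 : (pvDec a + pvDec b) % 10 = a % 2 + b % 2 := by omega
      rw [e1, e2, pvOr_div_two, pvOr_mod_two,
          ih (a / 2) (b / 2) (by omega)]
      congr 1
      have ha2 : a % 2 = 0 ∨ a % 2 = 1 := by omega
      have hb2 : b % 2 = 0 ∨ b % 2 = 1 := by omega
      rcases ha2 with h1 | h1 <;> rcases hb2 with h2' | h2' <;>
        rw [h1, h2'] <;> decide

-- zfill on a digit-headed list is a plain left pad with '0'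
theorem pvZfill_digits (c : Char) (cs : List Char) (w : Int) (hc : c.isDigit = true) :
    PySem.Chars.zfill (c :: cs) w
      = List.replicate (w.toNat - (c :: cs).length) '0' ++ (c :: cs) := by
  have hsign : ¬ (c = '+' ∨ c = '-') := by
    rintro (rfl | rfl) <;> simp at hc
  unfold PySem.Chars.zfill
  by_cases hw : w ≤ ((c :: cs).length : Int)
  · rw [if_pos hw]
    have : w.toNat - (c :: cs).length = 0 := by omega
    rw [this]
    simp
  · rw [if_neg hw]
    simp only [if_neg hsign]

-- A's inner j-loop builds the translation of the first k characters of s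
theorem pvRowFold (s : String) (k : Nat) (hk : k ≤ s.toList.length) (a0 : String) :
    (List.foldl (fun a j =>
        a ++ (if PySem.Str.pyGet? s j = some '0' then " " else "#")) a0
      (PySem.List.pyRange 0 (k : Int) 1)).toList
    = a0.toList ++ (s.toList.take k).map pvFA := by
  induction k generalizing a0 with
  | zero => simp [PySem.List.pyRange]
  | succ k ih =>
    have hk' : k < s.toList.length := by omega
    have hstep : ((k + 1 : Nat) : Int) = (k : Int) + 1 := by push_cast; ring
    rw [hstep, PySem.List.pyRange_one_succ_right (by positivity), List.foldl_append,
        List.foldl_cons, List.foldl_nil, String.toList_append, ih (by omega)]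
    have hget : PySem.Str.pyGet? s (k : Int) = some s.toList[k] := by
      simp [PySem.Str.pyGet?, PySem.List.pyGet?_natCast, List.getElem?_eq_getElem hk']
    rw [hget, List.take_add_one, List.getElem?_eq_getElem hk', List.map_append]
    simp only [Option.toList_some, List.map_cons, List.map_nil, List.append_assoc]
    congr 1
    by_cases h0 : s.toList[k] = '0'
    · rw [if_pos (by rw [h0]), h0]; rfl
    · rw [if_neg (by simpa using h0)]
      simp [pvFA, h0]

-- bin-slice of a nonnegative int is its binary digit list
theorem pvBinSlice (x : Int) (hx : 0 ≤ x) :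
    (PySem.Str.slice (PySem.Int.pyBin x) (some 2) none).toList
      = Nat.toDigits 2 x.toNat := by
  rw [PySem.Str.toList_slice, PySem.Chars.slice_eq_listSlice, PySem.Int.toList_pyBin]
  unfold PySem.Int.toBinChars0b
  rw [if_neg (by omega)]
  rw [PySem.List.slice_from _ (by norm_num)]
  rfl

-- the int() fold on that digit list yields the decimal reading of the binary digits
theorem pvParseBin (x : Int) (hx : 0 ≤ x) :
    pyIntOfDigits (PySem.Str.slice (PySem.Int.pyBin x) (some 2) none)
      = (pvDec x.toNat : Int) := by
  unfold pyIntOfDigits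
  rw [pvBinSlice x hx, pvToDigits_two, pvParse_toDigits]
  simp

-- one row of A equals one row of B, for nonnegative entries
theorem pvRowPair (n x y : Int) (hx : 0 ≤ x) (hy : 0 ≤ y) (hn : 0 < n) :
    (PySem.List.pyRange 0 n 1).foldl (fun a j =>
        a ++ (if PySem.Str.pyGet?
                (String.ofList (PySem.List.pyRepeat ['0'] (n - PySem.Str.len
                    (PySem.Int.toStr (pyIntOfDigits (PySem.Str.slice (PySem.Int.pyBin x) (some 2) none)
                      + pyIntOfDigits (PySem.Str.slice (PySem.Int.pyBin y) (some 2) none)))))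
                  ++ PySem.Int.toStr (pyIntOfDigits (PySem.Str.slice (PySem.Int.pyBin x) (some 2) none)
                      + pyIntOfDigits (PySem.Str.slice (PySem.Int.pyBin y) (some 2) none))) j
              = some '0' then " " else "#")) ""
    = String.ofList
        ((PySem.Str.slice (PySem.Str.zfill (PySem.Int.toBin (PySem.Int.bor x y)) n)
            none (some n)).toList.map (fun c => if c = '1' then '#' else ' ')) := by
  have hn0 : 0 ≤ n := le_of_lt hn
  set A := x.toNat with hA
  set B := y.toNat with hB
  -- the decimal string A builds
  have hsum : pyIntOfDigits (PySem.Str.slice (PySem.Int.pyBin x) (some 2) none)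
      + pyIntOfDigits (PySem.Str.slice (PySem.Int.pyBin y) (some 2) none)
      = ((pvDec A + pvDec B : Nat) : Int) := by
    rw [pvParseBin x hx, pvParseBin y hy]; push_cast; ring
  have hs3 : (PySem.Int.toStr (pyIntOfDigits (PySem.Str.slice (PySem.Int.pyBin x) (some 2) none)
      + pyIntOfDigits (PySem.Str.slice (PySem.Int.pyBin y) (some 2) none))).toList
      = Nat.toDigits 10 (pvDec A + pvDec B) := by
    rw [hsum, PySem.Int.toList_toStr]
    unfold PySem.Int.toChars
    rw [if_neg (by omega)]
    exact congrArg (Nat.toDigits 10) (Int.toNat_natCast _)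
  set ds10 := Nat.toDigits 10 (pvDec A + pvDec B) with hds10
  -- the binary string B builds
  have hbor : PySem.Int.bor x y = ((A ||| B : Nat) : Int) := by
    rw [PySem.Int.bor_of_nonneg hx hy]
  set cs2 := Nat.toDigits 2 (A ||| B) with hcs2
  have htb : (PySem.Int.toBin (PySem.Int.bor x y)).toList = cs2 := by
    rw [hbor, PySem.Int.toList_toBin]
    unfold PySem.Int.toBinChars
    rw [if_neg (by omega)]
    exact congrArg (Nat.toDigits 2) (Int.toNat_natCast _)
  -- cs2 is nonempty and starts with a digit
  obtain ⟨c, cs, hcons⟩ := List.exists_cons_of_ne_nil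
    (List.ne_nil_of_length_pos (Nat.length_toDigits_pos (b := 2) (n := A ||| B)))
  have hcdig : c.isDigit = true :=
    Nat.isDigit_of_mem_toDigits (b := 2) (n := A ||| B) (by norm_num) (by norm_num)
      (by rw [hcons]; exact List.mem_cons_self)
  -- core equality and its length consequence
  have hcore : ds10.map pvFA = cs2.map pvFB := pvMap_row A B
  have hlen : ds10.length = cs2.length := by
    have := congrArg List.length hcore
    simpa using this
  -- both full char lists agree after translation
  have hzfill : (PySem.Str.zfill (PySem.Int.toBin (PySem.Int.bor x y)) n).toList
      = List.replicate (n.toNat - cs2.length) '0' ++ cs2 := by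
    rw [PySem.Str.toList_zfill, htb, hcs2, hcons, pvZfill_digits c _ _ hcdig, ← hcons]
  have hpadlist : (String.ofList (PySem.List.pyRepeat ['0'] (n - PySem.Str.len
        (PySem.Int.toStr (pyIntOfDigits (PySem.Str.slice (PySem.Int.pyBin x) (some 2) none)
          + pyIntOfDigits (PySem.Str.slice (PySem.Int.pyBin y) (some 2) none)))))
      ++ PySem.Int.toStr (pyIntOfDigits (PySem.Str.slice (PySem.Int.pyBin x) (some 2) none)
          + pyIntOfDigits (PySem.Str.slice (PySem.Int.pyBin y) (some 2) none))).toList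
      = List.replicate ((n - (ds10.length : Int)).toNat) '0' ++ ds10 := by
    rw [String.toList_append, String.toList_ofList, PySem.List.pyRepeat_singleton,
        PySem.Str.len_eq, hs3]
  have hfull : (List.replicate ((n - (ds10.length : Int)).toNat) '0' ++ ds10).map pvFA
      = (List.replicate (n.toNat - cs2.length) '0' ++ cs2).map pvFB := by
    rw [List.map_append, List.map_append, List.map_replicate, List.map_replicate, hcore]
    have : ((n - (ds10.length : Int)).toNat) = n.toNat - cs2.length := by omega
    rw [this]
    rfl
  -- assemble
  apply String.toList_inj.mp
  have hlenpad : n.toNat ≤ (List.replicate ((n - (ds10.length : Int)).toNat) '0' ++ ds10).length := by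
    simp only [List.length_append, List.length_replicate]
    omega
  rw [show PySem.List.pyRange 0 n 1 = PySem.List.pyRange 0 ((n.toNat : Nat) : Int) 1 from by
        rw [Int.toNat_of_nonneg hn0],
      pvRowFold _ _ (by rw [hpadlist]; exact hlenpad), String.toList_empty,
      List.nil_append, String.toList_ofList, hpadlist, PySem.Str.toList_slice,
      PySem.Chars.slice_eq_listSlice, PySem.List.slice_to _ (by omega), hzfill]
  have hfb : (fun c => if c = '1' then '#' else ' ') = pvFB := rfl
  rw [hfb, List.map_take, List.map_take]
  exact congrArg _ hfull

-- ===== VERDICT (by name: the statement is the Claim_ definition above) =====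
theorem pvEntry_nonneg (arr : List Int) (n i : Int) (hp : ∀ x ∈ arr.take n.toNat, 0 ≤ x)
    (hi0 : 0 ≤ i) (hin : i < n) (hlen : n ≤ (arr.length : Int)) :
    0 ≤ PySem.List.pyGetD arr i 0 := by
  have hi1 : i < (arr.length : Int) := lt_of_lt_of_le hin hlen
  rw [PySem.List.pyGetD_eq_getElem arr 0 hi0 hi1]
  apply hp
  have hlt : i.toNat < (arr.take n.toNat).length := by
    simp only [List.length_take]
    omega
  have hmem := List.getElem_mem (l := arr.take n.toNat) (n := i.toNat) hlt
  rwa [List.getElem_take] at hmem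

theorem solution_spec : Claim_equal_solution := by
  intro n arr1 arr2 _ hpre
  obtain ⟨h1, h2, hp1, hp2⟩ := hpre
  unfold Spec_solution solution solution_alt
  simp only []
  rw [PySem.List.foldl_append_singleton_eq_map, List.nil_append]
  apply List.map_congr_left
  intro i hi
  rw [PySem.List.mem_pyRange_one] at hi
  obtain ⟨hi0, hin⟩ := hi
  rw [List.map_map, PySem.List.pyGetD_map_pyRange_of_nonneg _ n i "" hi0 hin]
  simp only [Function.comp]
  exact pvRowPair n _ _
    (pvEntry_nonneg arr1 n i hp1 hi0 hin h1)
    (pvEntry_nonneg arr2 n i hp2 hi0 hin h2)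
    (lt_of_le_of_lt hi0 hin)
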